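-- pv_equiv track=rewrite | github.com/Hunterdii/GeeksforGeeks-POTD | May 2025 GFG SOLUTION/May-27.py | leafNodes
-- ===== SOURCE A (Python) =====
-- def leafNodes(preorder):
--     s, r = [], []
--     for i in range(len(preorder)-1):
--         f = False
--         if preorder[i] > preorder[i+1]:
--             s.append(preorder[i])
--         else:
--             while s and preorder[i+1] > s[-1]:
--                 s.pop()
--                 f = True
--         if f:
--             r.append(preorder[i])
--     r.append(preorder[-1])
--     return r
-- ===== SOURCE B (Python) =====
-- def leafNodes(preorder):
--     # Next-greater-element sweep: position i (i < n-1) holds a leaf exactly when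
--     # some descent index j (preorder[j] > preorder[j+1]) has its first strictly
--     # greater successor at index i+1.  Collect those positions, then the last one.
--     n = len(preorder)
--     marks = set()
--     stack = []  # indices whose values are weakly decreasing
--     for k in range(n):
--         while stack and preorder[k] > preorder[stack[-1]]:
--             j = stack.pop()
--             if preorder[j] > preorder[j + 1]:
--                 marks.add(k - 1)
--         stack.append(k)
--     return [preorder[i] for i in range(n - 1) if i in marks] + [preorder[-1]]
-- ===== Notes on version B (the rewrite author's own statement) =====
-- stated objective: alternative
-- what changed: A detects leaves with a flag per step, a conditionally-pushed value stack and pops interleaved with output; B runs the standard next-greater-element index sweep (pushing every index), marks position k-1 in a set whenever a popped index is a descent, and builds the result in a separate final collection pass.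
import Mathlib
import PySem

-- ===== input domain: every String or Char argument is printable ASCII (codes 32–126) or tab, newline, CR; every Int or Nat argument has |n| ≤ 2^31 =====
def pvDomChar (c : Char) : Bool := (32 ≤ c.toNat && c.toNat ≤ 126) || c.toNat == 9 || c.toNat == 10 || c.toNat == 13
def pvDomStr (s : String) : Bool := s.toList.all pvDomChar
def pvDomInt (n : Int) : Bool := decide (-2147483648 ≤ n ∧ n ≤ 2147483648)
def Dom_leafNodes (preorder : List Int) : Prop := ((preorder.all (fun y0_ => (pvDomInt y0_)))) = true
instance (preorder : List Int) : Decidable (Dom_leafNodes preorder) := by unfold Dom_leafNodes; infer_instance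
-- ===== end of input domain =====

-- B replaces A's flag-and-conditional-push value stack by a standard next-greater-element
-- index sweep plus a final collection pass (alternative decomposition, same O(n) cost).

-- ===== PORT A =====
-- while s and preorder[i+1] > s[-1]: s.pop(); f = True
def leafNodesPop (x : Int) (s : List Int) (f : Bool) : List Int × Bool :=
  match h : s.getLast? with
  | none => (s, f)
  | some t => if t < x then leafNodesPop x s.dropLast true else (s, f)
termination_by s.length
decreasing_by
  have hne : s ≠ [] := by intro hs; simp [hs] at h
  have : 0 < s.length := List.length_pos_of_ne_nil hne
  simp [List.length_dropLast]; omega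

-- one iteration of A's for-loop; the loop indices i, i+1 are always in range, so getD 0 is never hit
def leafNodesStep (preorder : List Int) (st : List Int × List Int) (i : Int) : List Int × List Int :=
  let pi := PySem.List.pyGetD preorder i 0
  let pi1 := PySem.List.pyGetD preorder (i + 1) 0
  if pi1 < pi then (st.1 ++ [pi], st.2)          -- push branch; f stays False
  else
    let sf := leafNodesPop pi1 st.1 false
    if sf.2 then (sf.1, st.2 ++ [pi]) else (sf.1, st.2)

def leafNodes (preorder : List Int) : List Int :=
  let n : Int := preorder.length
  let sr := (PySem.List.pyRange 0 (n - 1) 1).foldl (leafNodesStep preorder) ([], [])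
  -- last-element subscript: the IndexError on empty input is excluded by Pre_
  sr.2 ++ [PySem.List.pyGetD preorder (-1) 0]

-- ===== PORT B =====
-- inner while: pop stack while preorder[k] > preorder[stack[-1]], marking k-1 for a popped descent j
def leafNodesAltPop (preorder : List Int) (k : Int) (marks : PySem.Set Int) (stack : List Int) :
    PySem.Set Int × List Int :=
  match h : stack.getLast? with
  | none => (marks, stack)
  | some j =>
    if PySem.List.pyGetD preorder j 0 < PySem.List.pyGetD preorder k 0 then
      let marks' := if PySem.List.pyGetD preorder (j + 1) 0 < PySem.List.pyGetD preorder j 0 then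
          PySem.Set.add marks (k - 1) else marks
      leafNodesAltPop preorder k marks' stack.dropLast
    else (marks, stack)
termination_by stack.length
decreasing_by
  have hne : stack ≠ [] := by intro hs; simp [hs] at h
  have : 0 < stack.length := List.length_pos_of_ne_nil hne
  simp [List.length_dropLast]; omega

def leafNodes_alt (preorder : List Int) : List Int :=
  let n : Int := preorder.length
  let ms := (PySem.List.pyRange 0 n 1).foldl
    (fun (st : PySem.Set Int × List Int) k =>
      let ms' := leafNodesAltPop preorder k st.1 st.2
      (ms'.1, ms'.2 ++ [k]))
    (PySem.Set.empty, [])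
  ((PySem.List.pyRange 0 (n - 1) 1).filter (fun i => PySem.Set.contains ms.1 i)).map
    (fun i => PySem.List.pyGetD preorder i 0)
  ++ [PySem.List.pyGetD preorder (-1) 0]

-- ===== PRECONDITION & SPEC =====
-- Pre_ excludes only the empty list, on which Python A raises IndexError reading the last element
def Pre_leafNodes (preorder : List Int) : Prop := preorder ≠ []
instance (preorder : List Int) : Decidable (Pre_leafNodes preorder) := by
  unfold Pre_leafNodes; infer_instance
def pvWitness_leafNodes : List Int := [5, 2, 10, 8]

def Spec_leafNodes (preorder : List Int) (out : List Int) : Prop := out = leafNodes_alt preorder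
instance (preorder : List Int) (out : List Int) : Decidable (Spec_leafNodes preorder out) := by
  unfold Spec_leafNodes; infer_instance

-- ===== CLAIM (what is proved, stated in full; the proofs are below) =====
def Claim_equal_leafNodes : Prop := ∀ (preorder : List Int), Dom_leafNodes preorder → Pre_leafNodes preorder → Spec_leafNodes preorder (leafNodes preorder)

-- ===== LEMMAS AND PROOFS =====

-- p.getD j 0, the value loops read (indices used by the ports are always in range)
def gIx (p : List Int) (j : Nat) : Int := p.getD j 0

-- "descent at j": p[j] > p[j+1]
def isDesc (p : List Int) (j : Nat) : Bool := decide (gIx p (j + 1) < gIx p j)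

-- "j dominates everything after it, strictly below m"
def okLt (p : List Int) (j m : Nat) : Bool := decide (∀ k, k < m → j < k → gIx p k ≤ gIx p j)

-- A's stack after i iterations
def stkA (p : List Int) (i : Nat) : List Int :=
  ((List.range i).filter (fun j => isDesc p j && okLt p j (i + 1))).map (gIx p)

-- the common leaf predicate at position i
def phiIdx (p : List Int) (i : Nat) : Bool :=
  (List.range i).any (fun j => isDesc p j && okLt p j (i + 1) && decide (gIx p j < gIx p (i + 1)))

-- A's r after i iterations
def resA (p : List Int) (i : Nat) : List Int :=
  ((List.range i).filter (fun i' => phiIdx p i')).map (gIx p)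

-- B's stack (as Nat indices) after m iterations
def stkBIdx (p : List Int) (m : Nat) : List Nat := (List.range m).filter (fun j => okLt p j m)

-- B's marks after m iterations
def marksM (p : List Int) (m : Nat) : List Int :=
  ((List.range m).filter (fun k => decide (1 ≤ k) && phiIdx p (k - 1))).map (fun k : Nat => ((Nat.cast k : Int) - 1))

lemma bool_eq_of_iff {a b : Bool} (h : a = true ↔ b = true) : a = b := by
  cases a <;> cases b <;> simp_all

lemma okLt_le {p : List Int} {j k m : Nat} (hj : j < k) (hk : k < m)
    (h : okLt p j m = true) : gIx p k ≤ gIx p j := by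
  simp only [okLt, decide_eq_true_eq] at h
  exact h k hk hj

lemma okLt_succ (p : List Int) {j m : Nat} (hj : j < m) :
    okLt p j (m + 1) = (okLt p j m && decide (gIx p m ≤ gIx p j)) := by
  simp only [okLt, ← Bool.decide_and]
  rw [decide_eq_decide]
  constructor
  · intro h
    exact ⟨fun k hk hjk => h k (by omega) hjk, h m (by omega) hj⟩
  · rintro ⟨h1, h2⟩ k hk hjk
    rcases Nat.lt_succ_iff_lt_or_eq.mp hk with h | h
    · exact h1 k h hjk
    · subst h; exact h2

lemma okLt_vacuous (p : List Int) {j m : Nat} (hj : m ≤ j + 1) : okLt p j m = true := by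
  simp only [okLt, decide_eq_true_eq]
  intro k hk hjk; omega

lemma any_filter' {α : Type} (l : List α) (q r : α → Bool) :
    (l.filter q).any r = l.any (fun a => q a && r a) := by
  induction l with
  | nil => rfl
  | cons x xs ih =>
    by_cases hq : q x <;> simp [hq, ih]

lemma stkA_pairwise (p : List Int) (i : Nat) :
    (stkA p i).Pairwise (fun a b => b ≤ a) := by
  unfold stkA
  rw [List.pairwise_map, List.pairwise_filter]
  have hlt : (List.range i).Pairwise (· < ·) := List.pairwise_lt_range
  refine hlt.imp_of_mem ?_
  intro a b ha hb hab hqa hqb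
  have hok : okLt p a (i + 1) = true := by
    have := hqa; simp only [Bool.and_eq_true] at this; exact this.2
  exact okLt_le hab (by have := List.mem_range.mp hb; omega) hok

lemma popA_eq (x : Int) (s : List Int) (hpw : s.Pairwise (fun a b => b ≤ a)) (f : Bool) :
    leafNodesPop x s f = (s.filter (fun v => decide (x ≤ v)), f || s.any (fun v => decide (v < x))) := by
  induction s using List.reverseRecOn generalizing f with
  | nil => simp [leafNodesPop]
  | append_singleton l t ih =>
    rw [leafNodesPop]
    have hpw' : l.Pairwise (fun a b => b ≤ a) := (List.pairwise_append.mp hpw).1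
    have hall : ∀ a ∈ l, t ≤ a := by
      intro a ha
      exact (List.pairwise_append.mp hpw).2.2 a ha t (by simp)
    by_cases h : t < x
    · simp only [List.dropLast_concat]
      rw [ih hpw' true]
      have hfil : (l ++ [t]).filter (fun v => decide (x ≤ v)) = l.filter (fun v => decide (x ≤ v)) := by
        simp [List.filter_append, show ¬ x ≤ t by omega]
      have hany : (l ++ [t]).any (fun v => decide (v < x)) = true := by
        simp [List.any_append, h]
      rw [hfil, hany]
      split
      · next heq => simp at heq
      · next t1 heq =>
          simp at heq; subst heq
          simp [h]
    ·
      have hfil : (l ++ [t]).filter (fun v => decide (x ≤ v)) = l ++ [t] := by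
        rw [List.filter_eq_self]
        intro a ha
        rcases List.mem_append.mp ha with ha | ha
        · simp; have := hall a ha; omega
        · simp at ha; subst ha; simp; omega
      have hany : (l ++ [t]).any (fun v => decide (v < x)) = false := by
        rw [List.any_eq_false]
        intro a ha
        rcases List.mem_append.mp ha with ha | ha
        · simp; have := hall a ha; omega
        · simp at ha; subst ha; simp; omega
      rw [hfil, hany]
      split
      · next heq => simp at heq
      · next t1 heq =>
          simp at heq; subst heq
          simp [h]

lemma gIx_def (p : List Int) (j : Nat) : p.getD j 0 = gIx p j := rfl

lemma isDesc_false {p : List Int} {i : Nat} (h : ¬ gIx p (i + 1) < gIx p i) :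
    isDesc p i = false := by simp [isDesc, h]

lemma phiIdx_false_of_desc {p : List Int} {i : Nat} (h : gIx p (i + 1) < gIx p i) :
    phiIdx p i = false := by
  unfold phiIdx
  rw [List.any_eq_false]
  intro j hj
  have hji : j < i := List.mem_range.mp hj
  simp only [Bool.and_eq_true, decide_eq_true_eq, not_and]
  rintro ⟨hd, ho⟩ hlt
  have := okLt_le hji (by omega) ho
  omega

lemma stepA_eq (p : List Int) (i : Nat) :
    leafNodesStep p (stkA p i, resA p i) (i : Int) = (stkA p (i + 1), resA p (i + 1)) := by
  have hcast : ((i : Int) + 1) = ((i + 1 : Nat) : Int) := by push_cast; ring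
  simp only [leafNodesStep, hcast, PySem.List.pyGetD_natCast, gIx_def]
  have hresA : resA p (i + 1) = resA p i ++ (if phiIdx p i then [gIx p i] else []) := by
    unfold resA
    rw [List.range_succ, List.filter_append, List.map_append]
    congr 1
    by_cases hphi : phiIdx p i <;> simp [hphi]
  by_cases h : gIx p (i + 1) < gIx p i
  · rw [if_pos h]
    have hphi : phiIdx p i = false := phiIdx_false_of_desc h
    have hstk : stkA p (i + 1) = stkA p i ++ [gIx p i] := by
      unfold stkA
      rw [List.range_succ, List.filter_append, List.map_append]
      congr 1
      · congr 1
        apply List.filter_congr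
        intro j hj
        have hji : j < i := List.mem_range.mp hj
        by_cases hd : isDesc p j = true
        · simp only [hd, Bool.true_and]
          by_cases ho : okLt p j (i + 1) = true
          · have hle : gIx p (i + 1) ≤ gIx p j :=
              le_trans (le_of_lt h) (okLt_le hji (by omega) ho)
            simp [okLt_succ p (show j < i + 1 by omega), ho, hle]
          · have ho' : okLt p j (i + 1) = false := Bool.eq_false_iff.mpr ho
            simp [okLt_succ p (show j < i + 1 by omega), ho']
        · simp [Bool.eq_false_iff.mpr hd]
      · have hd : isDesc p i = true := by simp [isDesc, h]
        have ho : okLt p i (i + 1 + 1) = true := by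
          rw [okLt_succ p (show i < i + 1 by omega), okLt_vacuous p (by omega)]
          simp [le_of_lt h]
        simp [hd, ho]
    rw [hstk, hresA, hphi]
    simp
  · rw [if_neg h]
    rw [popA_eq _ _ (stkA_pairwise p i) false]
    have hany : ((stkA p i).any fun v => decide (v < gIx p (i + 1))) = phiIdx p i := by
      unfold stkA phiIdx
      rw [List.any_map, any_filter']
      rfl
    have hfil : ((stkA p i).filter fun v => decide (gIx p (i + 1) ≤ v)) = stkA p (i + 1) := by
      unfold stkA
      rw [List.filter_map, List.filter_filter]
      rw [List.range_succ, List.filter_append]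
      have h2 : (List.filter (fun j => isDesc p j && okLt p j (i + 1 + 1)) [i]) = [] := by
        simp [isDesc_false h]
      rw [h2, List.append_nil]
      congr 1
      apply List.filter_congr
      intro j hj
      have hji : j < i := List.mem_range.mp hj
      by_cases hd : isDesc p j = true
      · simp only [Function.comp, hd, Bool.true_and]
        rw [okLt_succ p (show j < i + 1 by omega)]
        exact Bool.and_comm _ _
      · simp [Bool.eq_false_iff.mpr hd]
    rw [hany, hfil, hresA]
    by_cases hphi : phiIdx p i <;> simp [hphi]

theorem leafNodes_loopA (p : List Int) (m : Nat) :
    (PySem.List.pyRange 0 (m : Int) 1).foldl (leafNodesStep p) ([], []) = (stkA p m, resA p m) := by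
  induction m with
  | zero =>
    rw [show ((0 : Nat) : Int) = 0 by norm_num, PySem.List.pyRange_one_eq_nil (le_refl 0)]
    simp [stkA, resA]
  | succ m ih =>
    have hc : ((m + 1 : Nat) : Int) = (m : Int) + 1 := by push_cast; ring
    rw [hc, PySem.List.pyRange_one_succ_right (Int.natCast_nonneg m), List.foldl_append, ih]
    simpa using stepA_eq p m


lemma stkBIdx_pairwise (p : List Int) (m : Nat) :
    (stkBIdx p m).Pairwise (fun a b => gIx p b ≤ gIx p a) := by
  unfold stkBIdx
  rw [List.pairwise_filter]
  have hlt : (List.range m).Pairwise (· < ·) := List.pairwise_lt_range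
  refine hlt.imp_of_mem ?_
  intro a b ha hb hab hqa hqb
  exact okLt_le hab (List.mem_range.mp hb) hqa

lemma popB_eq (p : List Int) (k : Nat) (l : List Nat)
    (hpw : l.Pairwise (fun a b => gIx p b ≤ gIx p a)) (marks : PySem.Set Int) :
    leafNodesAltPop p (k : Int) marks (l.map (Nat.cast : Nat → Int)) =
      ((if l.any (fun j => decide (gIx p j < gIx p k) && isDesc p j) then
          PySem.Set.add marks ((k : Int) - 1) else marks),
       (l.filter (fun j => decide (gIx p k ≤ gIx p j))).map (Nat.cast : Nat → Int)) := by
  induction l using List.reverseRecOn generalizing marks with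
  | nil => simp [leafNodesAltPop]
  | append_singleton l' t ih =>
    rw [List.map_append, leafNodesAltPop]
    have hpw' : l'.Pairwise (fun a b => gIx p b ≤ gIx p a) := (List.pairwise_append.mp hpw).1
    have hall : ∀ a ∈ l', gIx p t ≤ gIx p a := by
      intro a ha
      exact (List.pairwise_append.mp hpw).2.2 a ha t (by simp)
    have hc1 : ((t : Int) + 1) = ((t + 1 : Nat) : Int) := by push_cast; ring
    by_cases h : gIx p t < gIx p k
    · have hfil : ((l' ++ [t]).filter fun j => decide (gIx p k ≤ gIx p j)) =
          l'.filter (fun j => decide (gIx p k ≤ gIx p j)) := by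
        simp [List.filter_append, show ¬ gIx p k ≤ gIx p t by omega]
      rw [hfil]
      by_cases hd : gIx p (t + 1) < gIx p t
      · have hany : ((l' ++ [t]).any fun j => decide (gIx p j < gIx p k) && isDesc p j) = true := by
          simp [List.any_append, h, isDesc, hd]
        rw [hany, if_pos rfl]
        split
        · next heq => simp at heq
        · next t1 heq =>
            simp at heq
            subst heq
            rw [if_pos (by simpa [PySem.List.pyGetD_natCast, gIx_def] using h)]
            simp only [PySem.List.pyGetD_natCast, hc1, gIx_def, List.map_cons, List.map_nil, List.dropLast_concat]
            rw [if_pos hd, ih hpw' (PySem.Set.add marks ((k : Int) - 1))]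
            by_cases ha : (l'.any fun j => decide (gIx p j < gIx p k) && isDesc p j) = true
            · simp [ha]
            · simp [Bool.eq_false_iff.mpr ha]
      · have hde : isDesc p t = false := by simp [isDesc, hd]
        have hany : ((l' ++ [t]).any fun j => decide (gIx p j < gIx p k) && isDesc p j) =
            (l'.any fun j => decide (gIx p j < gIx p k) && isDesc p j) := by
          simp [List.any_append, hde]
        rw [hany]
        split
        · next heq => simp at heq
        · next t1 heq =>
            simp at heq
            subst heq
            rw [if_pos (by simpa [PySem.List.pyGetD_natCast, gIx_def] using h)]
            simp only [PySem.List.pyGetD_natCast, hc1, gIx_def, List.map_cons, List.map_nil, List.dropLast_concat]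
            rw [if_neg hd, ih hpw' marks]
    · have hfil : ((l' ++ [t]).filter fun j => decide (gIx p k ≤ gIx p j)) = l' ++ [t] := by
        rw [List.filter_eq_self]
        intro a ha
        rcases List.mem_append.mp ha with ha | ha
        · simp; have := hall a ha; omega
        · simp at ha; subst ha; simp; omega
      have hany : ((l' ++ [t]).any fun j => decide (gIx p j < gIx p k) && isDesc p j) = false := by
        rw [List.any_eq_false]
        intro a ha
        rcases List.mem_append.mp ha with ha | ha
        · have := hall a ha
          simp only [Bool.and_eq_true, decide_eq_true_eq, not_and]
          intro hlt; omega
        · simp at ha; subst ha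
          simp only [Bool.and_eq_true, decide_eq_true_eq, not_and]
          intro hlt; omega
      rw [hany, hfil, if_neg (by simp)]
      split
      · next heq => simp at heq
      · next t1 heq =>
          simp at heq
          subst heq
          rw [if_neg (by simpa [PySem.List.pyGetD_natCast, gIx_def] using h), ← List.map_append]

lemma not_mem_marksM (p : List Int) (m : Nat) : ((m : Int) - 1) ∉ marksM p m := by
  unfold marksM
  simp only [List.mem_map, List.mem_filter, List.mem_range, not_exists]
  rintro k ⟨⟨hk, -⟩, hek⟩
  omega

lemma anyB_eq_phi (p : List Int) (m : Nat) :
    ((stkBIdx p m).any fun j => decide (gIx p j < gIx p m) && isDesc p j) =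
      (decide (1 ≤ m) && phiIdx p (m - 1)) := by
  cases m with
  | zero => simp [stkBIdx]
  | succ m' =>
    simp only [Nat.add_sub_cancel]
    apply bool_eq_of_iff
    unfold stkBIdx phiIdx
    simp only [any_filter', List.any_eq_true, List.mem_range, Bool.and_eq_true,
      decide_eq_true_eq, isDesc]
    constructor
    · rintro ⟨j, hj, hok, hlt, hds⟩
      refine ⟨by omega, j, ?_, ⟨hds, hok⟩, hlt⟩
      by_contra hge
      have : j = m' := by omega
      subst this
      omega
    · rintro ⟨-, j, hj, ⟨hds, hok⟩, hlt⟩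
      exact ⟨j, by omega, hok, hlt, hds⟩

lemma stepB_eq (p : List Int) (m : Nat) :
    (fun (st : PySem.Set Int × List Int) k =>
        let ms' := leafNodesAltPop p k st.1 st.2
        (ms'.1, ms'.2 ++ [k]))
      (marksM p m, (stkBIdx p m).map (Nat.cast : Nat → Int)) ((m : Nat) : Int) =
    (marksM p (m + 1), (stkBIdx p (m + 1)).map (Nat.cast : Nat → Int)) := by
  simp only []
  rw [popB_eq p m (stkBIdx p m) (stkBIdx_pairwise p m) (marksM p m)]
  have hmarks : (if ((stkBIdx p m).any fun j => decide (gIx p j < gIx p m) && isDesc p j) = true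
      then PySem.Set.add (marksM p m) ((m : Int) - 1) else marksM p m) = marksM p (m + 1) := by
    rw [anyB_eq_phi]
    have hm1 : marksM p (m + 1) =
        marksM p m ++ (if (decide (1 ≤ m) && phiIdx p (m - 1)) = true
          then [(m : Int) - 1] else []) := by
      unfold marksM
      rw [List.range_succ, List.filter_append, List.map_append]
      by_cases hc : (decide (1 ≤ m) && phiIdx p (m - 1)) = true <;> simp [hc]
    rw [hm1]
    by_cases hc : (decide (1 ≤ m) && phiIdx p (m - 1)) = true
    · rw [if_pos hc, if_pos hc, PySem.Set.add_of_not_mem (not_mem_marksM p m)]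
    · rw [if_neg hc, if_neg hc, List.append_nil]
  have hstk : ((stkBIdx p m).filter fun j => decide (gIx p m ≤ gIx p j)).map (Nat.cast : Nat → Int)
      ++ [((m : Nat) : Int)] = (stkBIdx p (m + 1)).map (Nat.cast : Nat → Int) := by
    have hidx : stkBIdx p (m + 1) =
        ((stkBIdx p m).filter fun j => decide (gIx p m ≤ gIx p j)) ++ [m] := by
      unfold stkBIdx
      rw [List.filter_filter, List.range_succ, List.filter_append]
      congr 1
      · apply List.filter_congr
        intro j hj
        have hji : j < m := List.mem_range.mp hj
        rw [okLt_succ p hji]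
        exact Bool.and_comm _ _
      · simp [okLt_vacuous p (show m + 1 ≤ m + 1 by omega)]
    rw [hidx, List.map_append]
    simp
  rw [hmarks] at *
  simp only [Prod.mk.injEq]
  exact ⟨trivial, hstk⟩

theorem leafNodes_loopB (p : List Int) (m : Nat) :
    (PySem.List.pyRange 0 (m : Int) 1).foldl
      (fun (st : PySem.Set Int × List Int) k =>
        let ms' := leafNodesAltPop p k st.1 st.2
        (ms'.1, ms'.2 ++ [k]))
      (PySem.Set.empty, []) = (marksM p m, (stkBIdx p m).map (Nat.cast : Nat → Int)) := by
  induction m with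
  | zero =>
    rw [show ((0 : Nat) : Int) = 0 by norm_num, PySem.List.pyRange_one_eq_nil (le_refl 0)]
    simp [marksM, stkBIdx, PySem.Set.empty]
  | succ m ih =>
    have hc : ((m + 1 : Nat) : Int) = (m : Int) + 1 := by push_cast; ring
    rw [hc, PySem.List.pyRange_one_succ_right (Int.natCast_nonneg m), List.foldl_append, ih]
    simpa using stepB_eq p m

lemma contains_marksM (p : List Int) {i n : Nat} (hi : i + 1 < n) :
    PySem.Set.contains (marksM p n) ((i : Nat) : Int) = phiIdx p i := by
  apply bool_eq_of_iff
  rw [PySem.Set.contains_iff]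
  unfold marksM
  simp only [List.mem_map, List.mem_filter, List.mem_range, Bool.and_eq_true,
    decide_eq_true_eq]
  constructor
  · rintro ⟨k, ⟨⟨hk, h1⟩, hek⟩⟩
    have hki : k = i + 1 := by omega
    subst hki
    simpa using h1.2
  · intro hphi
    exact ⟨i + 1, ⟨⟨hi, by omega, by simpa using hphi⟩, by push_cast; ring⟩⟩

-- ===== VERDICT (by name: the statement is the Claim_ definition above) =====
theorem leafNodes_spec : Claim_equal_leafNodes := by
  intro p _dom hpre
  unfold Pre_leafNodes at hpre
  unfold Spec_leafNodes
  have hlen : 1 ≤ p.length := List.length_pos_of_ne_nil hpre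
  have hc : ((p.length : Int) - 1) = ((p.length - 1 : Nat) : Int) := by omega
  simp only [leafNodes, leafNodes_alt]
  rw [hc, leafNodes_loopA p (p.length - 1), leafNodes_loopB p p.length]
  congr 1
  unfold resA
  rw [PySem.List.pyRange_zero_nat, List.filter_map, List.map_map]
  dsimp only
  rw [show ((fun i => PySem.List.pyGetD p i 0) ∘ fun k : Nat => (k : Int)) = gIx p from
    funext fun i => by simp [gIx, List.getD_eq_getElem?_getD]]
  congr 1
  apply List.filter_congr
  intro i hi
  have hii : i < p.length - 1 := List.mem_range.mp hi
  simpa [Function.comp] using (contains_marksM p (show i + 1 < p.length by omega)).symm
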